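-- pv_equiv track=rewrite | github.com/NJNAN/kafka-flink-video-streaming-asr | subtitle-agent/agent/glossary.py | sample_transcript_text
-- ===== SOURCE A (Python) =====
-- def sample_transcript_text(items: list[dict], max_chars: int = 14000) -> str:
--     parts: list[str] = []
--     used = 0
--     for index, item in enumerate(items, start=1):
--         text = f"{index}. {item.get('text', '')}\n"
--         if used + len(text) > max_chars:
--             break
--         parts.append(text)
--         used += len(text)
--     return "".join(parts)
-- ===== SOURCE B (Python) =====
-- def sample_transcript_text(items: list[dict], max_chars: int = 14000) -> str:
--     # Materialize-then-prefix-slice: format everything, take running length totals,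
--     # count how many leading entries fit, then join that prefix.
--     formatted = [f"{i}. {item.get('text', '')}\n" for i, item in enumerate(items, 1)]
--     prefixes = []
--     total = 0
--     for t in formatted:
--         total += len(t)
--         prefixes.append(total)
--     count = sum(1 for p in prefixes if p <= max_chars)
--     return "".join(formatted[:count])
-- ===== Notes on version B (the rewrite author's own statement) =====
-- stated objective: alternative
-- what changed: Replaces the break-driven incremental accumulation loop by a materialize-then-prefix-slice decomposition: build all formatted lines, compute running length totals, count the leading totals that stay within max_chars (valid because every line is non-empty, so totals are strictly increasing), and join that prefix slice.
import Mathlib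
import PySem

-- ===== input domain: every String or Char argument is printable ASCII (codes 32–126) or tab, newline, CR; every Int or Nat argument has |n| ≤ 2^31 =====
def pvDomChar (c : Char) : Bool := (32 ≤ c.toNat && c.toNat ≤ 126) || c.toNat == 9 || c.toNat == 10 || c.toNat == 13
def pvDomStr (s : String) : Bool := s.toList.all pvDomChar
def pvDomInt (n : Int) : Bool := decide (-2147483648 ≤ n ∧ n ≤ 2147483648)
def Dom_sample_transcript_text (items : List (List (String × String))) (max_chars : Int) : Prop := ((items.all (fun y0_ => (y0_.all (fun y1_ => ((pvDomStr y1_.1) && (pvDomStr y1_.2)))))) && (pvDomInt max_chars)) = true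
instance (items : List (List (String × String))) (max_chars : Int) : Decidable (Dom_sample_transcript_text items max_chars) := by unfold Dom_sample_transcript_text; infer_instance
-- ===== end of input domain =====

-- B replaces A's break-driven accumulate loop by a materialize / prefix-sum / count / slice decomposition (objective: alternative, same cost).

-- ===== PORT A =====
-- the for loop of A: index, parts, used are the loop state; break returns parts as they stand
def pvALoop (items : List (List (String × String))) (max_chars : Int)
    (index : Int) (parts : List String) (used : Int) : List String :=
  match items with
  | [] => parts
  | item :: rest =>
      let text := PySem.Int.toStr index ++ ". " ++ (PySem.Dict.mk item).getD "text" "" ++ "\n"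
      if used + PySem.Str.len text > max_chars then parts
      else pvALoop rest max_chars (index + 1) (parts ++ [text]) (used + PySem.Str.len text)

def sample_transcript_text (items : List (List (String × String))) (max_chars : Int) : String :=
  PySem.Str.join "" (pvALoop items max_chars 1 [] 0)

-- ===== PORT B =====
def sample_transcript_text_alt (items : List (List (String × String))) (max_chars : Int) : String :=
  let formatted := (PySem.List.enumerate items 1).map
      (fun p => PySem.Int.toStr p.1 ++ ". " ++ (PySem.Dict.mk p.2).getD "text" "" ++ "\n")
  let prefixes := (formatted.foldl
      (fun (st : List Int × Int) t => (st.1 ++ [st.2 + PySem.Str.len t], st.2 + PySem.Str.len t))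
      ([], 0)).1
  let count := prefixes.countP (fun p => decide (p ≤ max_chars))
  PySem.Str.join "" (formatted.take count)

-- ===== PRECONDITION & SPEC =====
def Spec_sample_transcript_text (items : List (List (String × String))) (max_chars : Int) (out : String) : Prop := out = sample_transcript_text_alt items max_chars
instance (items : List (List (String × String))) (max_chars : Int) (out : String) : Decidable (Spec_sample_transcript_text items max_chars out) := by unfold Spec_sample_transcript_text; infer_instance

-- ===== CLAIM (what is proved, stated in full; the proofs are below) =====
def Claim_equal_sample_transcript_text : Prop := ∀ (items : List (List (String × String))) (max_chars : Int), Dom_sample_transcript_text items max_chars → Spec_sample_transcript_text items max_chars (sample_transcript_text items max_chars)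

-- ===== LEMMAS AND PROOFS =====

-- the formatted line of entry `item` at 1-based position `i`
def pvFmt (i : Int) (item : List (String × String)) : String :=
  PySem.Int.toStr i ++ ". " ++ (PySem.Dict.mk item).getD "text" "" ++ "\n"

-- the formatted lines of `items`, numbering starting at `i`
def pvFmtFrom (items : List (List (String × String))) (i : Int) : List String :=
  match items with
  | [] => []
  | item :: rest => pvFmt i item :: pvFmtFrom rest (i + 1)

-- running totals of `ls` starting from `c`
def pvPfx (c : Int) (ls : List Int) : List Int :=
  match ls with
  | [] => []
  | l :: ls' => (c + l) :: pvPfx (c + l) ls'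

theorem pvFmtFrom_eq_enum_map (items : List (List (String × String))) (i : Int) :
    (PySem.List.enumerate items i).map
      (fun p => PySem.Int.toStr p.1 ++ ". " ++ (PySem.Dict.mk p.2).getD "text" "" ++ "\n")
    = pvFmtFrom items i := by
  induction items generalizing i with
  | nil => simp [pvFmtFrom, PySem.List.enumerate_nil]
  | cons it rest ih => simp [pvFmtFrom, PySem.List.enumerate_cons, pvFmt, ih]

theorem pvFoldl_eq_pfx (fs : List String) (acc : List Int) (c : Int) :
    (fs.foldl
      (fun (st : List Int × Int) t => (st.1 ++ [st.2 + PySem.Str.len t], st.2 + PySem.Str.len t))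
      (acc, c)).1 = acc ++ pvPfx c (fs.map PySem.Str.len) := by
  induction fs generalizing acc c with
  | nil => simp [pvPfx]
  | cons t rest ih =>
      simp only [List.foldl_cons, List.map_cons, pvPfx]
      rw [ih]
      simp

theorem pvPfx_lower (ls : List Int) (c : Int) (h : ∀ l ∈ ls, 1 ≤ l) :
    ∀ p ∈ pvPfx c ls, c + 1 ≤ p := by
  induction ls generalizing c with
  | nil => simp [pvPfx]
  | cons l ls' ih =>
      intro p hp
      simp only [pvPfx, List.mem_cons] at hp
      rcases hp with rfl | hp
      · have := h l (List.mem_cons_self ..); omega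
      · have h1 := h l (List.mem_cons_self ..)
        have := ih (c + l) (fun x hx => h x (List.mem_cons_of_mem _ hx)) p hp
        omega

theorem pvFmt_len_pos (i : Int) (item : List (String × String)) : 1 ≤ PySem.Str.len (pvFmt i item) := by
  simp [pvFmt, PySem.Str.len]
  omega

theorem pvFmtFrom_len_pos (items : List (List (String × String))) (i : Int) :
    ∀ t ∈ pvFmtFrom items i, 1 ≤ PySem.Str.len t := by
  induction items generalizing i with
  | nil => simp [pvFmtFrom]
  | cons it rest ih =>
      intro t ht
      simp only [pvFmtFrom, List.mem_cons] at ht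
      rcases ht with rfl | ht
      · exact pvFmt_len_pos ..
      · exact ih (i + 1) t ht

theorem pvALoop_eq (items : List (List (String × String))) (max_chars : Int) :
    ∀ (i : Int) (parts : List String) (used : Int),
    pvALoop items max_chars i parts used
    = parts ++ (pvFmtFrom items i).take
        ((pvPfx used ((pvFmtFrom items i).map PySem.Str.len)).countP
          (fun p => decide (p ≤ max_chars))) := by
  induction items with
  | nil => intro i parts used; simp [pvALoop, pvFmtFrom]
  | cons it rest ih =>
      intro i parts used
      have hlen := pvFmt_len_pos i it
      rw [pvALoop]
      rw [show (PySem.Int.toStr i ++ ". " ++ (PySem.Dict.mk it).getD "text" "" ++ "\n") = pvFmt i it from rfl]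
      simp only [pvFmtFrom, List.map_cons, pvPfx, List.countP_cons]
      by_cases h : used + PySem.Str.len (pvFmt i it) > max_chars
      · rw [if_pos h]
        have hc0 : (pvPfx (used + PySem.Str.len (pvFmt i it))
            ((pvFmtFrom rest (i + 1)).map PySem.Str.len)).countP
            (fun p => decide (p ≤ max_chars)) = 0 := by
          rw [List.countP_eq_zero]
          intro p hp
          have := pvPfx_lower _ _ (by
            intro l hl
            obtain ⟨t, ht, rfl⟩ := List.mem_map.mp hl
            exact pvFmtFrom_len_pos rest (i + 1) t ht) p hp
          simp only [decide_eq_true_eq]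
          omega
        rw [hc0]
        have hhead : ¬ (used + ((pvFmt i it).length : Int) ≤ max_chars) := by
          simp only [PySem.Str.len_eq, String.length_toList] at h; omega
        simp [hhead]
      · rw [if_neg h]
        rw [ih (i + 1) (parts ++ [pvFmt i it]) (used + PySem.Str.len (pvFmt i it))]
        have hhead : used + ((pvFmt i it).length : Int) ≤ max_chars := by
          simp only [PySem.Str.len_eq, String.length_toList] at h; omega
        simp [hhead, List.take_succ_cons]

-- ===== VERDICT (by name: the statement is the Claim_ definition above) =====
theorem sample_transcript_text_spec : Claim_equal_sample_transcript_text := by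
  intro items max_chars _
  unfold Spec_sample_transcript_text
  simp only [sample_transcript_text, sample_transcript_text_alt]
  rw [pvFmtFrom_eq_enum_map, pvFoldl_eq_pfx, pvALoop_eq]
  simp
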